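-- pv_equiv track=rewrite | github.com/Lautarostuve/LexerPY | algoritmolexer.py | automataparentesis1
-- ===== SOURCE A (Python) =====
-- ESTADO_FINAL="Estado final"
--
-- ESTADO_TRAMPA="Estado trampa"
--
-- ESTADO_NO_FINAL="Estado aceptado"
--
-- def automataparentesis1(lexema):
--     estado = 0
--     estados_finales = [1]
--     for caracter in lexema:
--         if estado == 0 and caracter == '(':
--             estado = 1
--         else:
--             estado =-1
--             break
--
--     if estado == -1:
--         return ESTADO_TRAMPA
--     elif estado in estados_finales:
--         return ESTADO_FINAL
--     else:
--         return ESTADO_NO_FINAL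
-- ===== SOURCE B (Python) =====
-- ESTADO_FINAL = "Estado final"
-- ESTADO_TRAMPA = "Estado trampa"
-- ESTADO_NO_FINAL = "Estado aceptado"
--
-- def automataparentesis1(lexema):
--     if lexema == '(':
--         return ESTADO_FINAL
--     elif lexema == '':
--         return ESTADO_NO_FINAL
--     else:
--         return ESTADO_TRAMPA
-- ===== Notes on version B (the rewrite author's own statement) =====
-- stated objective: simpler
-- what changed: Replaced the character-by-character state-machine loop with a closed-form three-way classification by direct string comparison ('(' -> final, '' -> accepted, otherwise trap).
import Mathlib
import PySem

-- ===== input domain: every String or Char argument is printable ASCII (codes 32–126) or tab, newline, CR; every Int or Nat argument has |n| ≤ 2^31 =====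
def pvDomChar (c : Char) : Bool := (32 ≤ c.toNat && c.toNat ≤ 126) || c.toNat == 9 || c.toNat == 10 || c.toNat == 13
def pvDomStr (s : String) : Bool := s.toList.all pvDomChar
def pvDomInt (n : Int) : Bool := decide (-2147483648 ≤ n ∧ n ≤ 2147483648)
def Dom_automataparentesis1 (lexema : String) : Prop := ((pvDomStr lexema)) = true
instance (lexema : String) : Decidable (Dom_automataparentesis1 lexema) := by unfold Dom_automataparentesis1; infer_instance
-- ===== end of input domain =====

-- B replaces A's character-by-character automaton loop with a closed-form
-- three-way string comparison; same results, simpler (objective: simpler).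

-- ===== PORT A =====
-- the for-loop with its mid-loop break: estado is threaded; break is modelled
-- by returning -1 immediately (no further iterations can change -1's branch)
def pvLoopA : List Char → Int → Int
  | [], e => e
  | c :: cs, e => if e == 0 && c == '(' then pvLoopA cs 1 else -1

def automataparentesis1 (lexema : String) : String :=
  let estado := pvLoopA lexema.toList 0
  let estados_finales : List Int := [1]
  if estado == -1 then "Estado trampa"
  else if estados_finales.contains estado then "Estado final"
  else "Estado aceptado"

-- ===== PORT B =====
def automataparentesis1_alt (lexema : String) : String :=
  if lexema == "(" then "Estado final"
  else if lexema == "" then "Estado aceptado"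
  else "Estado trampa"

-- ===== PRECONDITION & SPEC =====
def Spec_automataparentesis1 (lexema : String) (out : String) : Prop := out = automataparentesis1_alt lexema
instance (lexema : String) (out : String) : Decidable (Spec_automataparentesis1 lexema out) := by unfold Spec_automataparentesis1; infer_instance

-- ===== CLAIM (what is proved, stated in full; the proofs are below) =====
def Claim_equal_automataparentesis1 : Prop := ∀ (lexema : String), Dom_automataparentesis1 lexema → Spec_automataparentesis1 lexema (automataparentesis1 lexema)

-- ===== LEMMAS AND PROOFS =====
theorem key (l : List Char) :
    automataparentesis1 (String.ofList l) = automataparentesis1_alt (String.ofList l) := by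
  have hl : (String.ofList l).toList = l := by simp
  match l with
  | [] => decide
  | [c] =>
    simp only [automataparentesis1, automataparentesis1_alt, hl, pvLoopA]
    by_cases hc : c = '('
    · subst hc; decide
    · have h1 : ¬ (String.ofList [c] = "(") := by
        rw [show ("(" : String) = String.ofList ['('] from rfl, String.ofList_inj]
        simp [hc]
      have h2 : ¬ (String.ofList [c] = "") := by
        rw [show ("" : String) = String.ofList [] from rfl, String.ofList_inj]
        simp
      simp_all
  | c :: d :: rest =>
    simp only [automataparentesis1, automataparentesis1_alt, hl, pvLoopA]
    have h1 : ¬ (String.ofList (c :: d :: rest) = "(") := by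
      rw [show ("(" : String) = String.ofList ['('] from rfl, String.ofList_inj]
      simp
    have h2 : ¬ (String.ofList (c :: d :: rest) = "") := by
      rw [show ("" : String) = String.ofList [] from rfl, String.ofList_inj]
      simp
    by_cases hc : c = '(' <;> simp_all

-- ===== VERDICT (by name: the statement is the Claim_ definition above) =====
theorem automataparentesis1_spec : Claim_equal_automataparentesis1 := by
  intro lexema _
  have h := key lexema.toList
  simpa [Spec_automataparentesis1] using h
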